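-- pv_equiv track=rewrite | github.com/shivsharcode/Problem-Solving | CODECHEF/Normal is Good(Optimal Approach).py | subarr_sum_without
-- ===== SOURCE A (Python) =====
-- def subarr_sum_without(x, arr):
--     subarr_count = 0
--     prefix_sum = 0
--     hashmap = {0:1}
--
--     for num in arr:
--         if num == x:
--             prefix_sum = 0
--             hashmap = {0:1}
--         else:
--             prefix_sum += num
--             subarr_count += hashmap.get(prefix_sum, 0)
--             hashmap[prefix_sum] = hashmap.get(prefix_sum, 0) + 1
--
--     return subarr_count
-- ===== SOURCE B (Python) =====
-- def _count_from(x, suffix):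
--     # zero running-sum prefixes of suffix, stopping at the first x
--     c = 0
--     s = 0
--     for v in suffix:
--         if v == x:
--             break
--         s += v
--         if s == 0:
--             c += 1
--     return c
--
-- def subarr_sum_without(x, arr):
--     total = 0
--     suffix = arr
--     while suffix:
--         total += _count_from(x, suffix)
--         suffix = suffix[1:]
--     return total
-- ===== Notes on version B (the rewrite author's own statement) =====
-- stated objective: alternative
-- what changed: Replaced the single-pass prefix-sum hashmap (reset on x) by a brute-force rescan: for each start position, walk the suffix keeping a running sum, break at the first x, and count the positions where the running sum is zero.
import Mathlib
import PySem

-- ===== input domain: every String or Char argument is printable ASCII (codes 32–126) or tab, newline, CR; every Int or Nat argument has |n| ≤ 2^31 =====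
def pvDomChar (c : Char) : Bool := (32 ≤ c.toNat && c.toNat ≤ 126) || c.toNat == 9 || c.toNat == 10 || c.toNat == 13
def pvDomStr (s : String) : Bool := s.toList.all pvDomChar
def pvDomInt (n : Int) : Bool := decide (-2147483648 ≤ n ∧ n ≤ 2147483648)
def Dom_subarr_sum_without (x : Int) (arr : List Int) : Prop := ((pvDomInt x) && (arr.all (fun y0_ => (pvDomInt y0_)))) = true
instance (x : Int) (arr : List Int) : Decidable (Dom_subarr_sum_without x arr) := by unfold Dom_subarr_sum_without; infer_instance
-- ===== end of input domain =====

-- B drops A's prefix-sum hashmap and instead rescans from every start position (alternative O(n^2) brute force); same return value.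

-- ===== PORT A =====
-- literal port of A: one pass, state (subarr_count, prefix_sum, hashmap), reset on x
def subarr_sum_without (x : Int) (arr : List Int) : Int :=
  (arr.foldl
    (fun (st : Int × Int × PySem.Dict Int Int) num =>
      if num = x then (st.1, 0, PySem.Dict.ofList [((0 : Int), (1 : Int))])
      else
        let ps := st.2.1 + num
        let h := st.2.2
        (st.1 + h.getD ps 0, ps, h.insert ps (h.getD ps 0 + 1)))
    (0, 0, PySem.Dict.ofList [((0 : Int), (1 : Int))])).1

-- ===== PORT B =====
-- port of Source B's _count_from: running sum over the suffix, break at the first x, count zeros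
def pvCountFrom (x s c : Int) : List Int → Int
  | [] => c
  | v :: t =>
    if v = x then c
    else
      let s' := s + v
      pvCountFrom x s' (if s' = 0 then c + 1 else c) t

-- port of Source B's while loop: accumulate _count_from over the successive suffixes
def pvBLoop (x total : Int) : List Int → Int
  | [] => total
  | v :: t => pvBLoop x (total + pvCountFrom x 0 0 (v :: t)) t

def subarr_sum_without_alt (x : Int) (arr : List Int) : Int :=
  pvBLoop x 0 arr

-- ===== PRECONDITION & SPEC =====
def Spec_subarr_sum_without (x : Int) (arr : List Int) (out : Int) : Prop := out = subarr_sum_without_alt x arr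
instance (x : Int) (arr : List Int) (out : Int) : Decidable (Spec_subarr_sum_without x arr out) := by unfold Spec_subarr_sum_without; infer_instance

-- ===== CLAIM (what is proved, stated in full; the proofs are below) =====
def Claim_equal_subarr_sum_without : Prop := ∀ (x : Int) (arr : List Int), Dom_subarr_sum_without x arr → Spec_subarr_sum_without x arr (subarr_sum_without x arr)

-- ===== LEMMAS AND PROOFS =====

-- pure count of zero-sum x-free subarrays starting at the head, with running sum seeded by s
def pvInner (x s : Int) : List Int → Int
  | [] => 0
  | a :: t => if a = x then 0 else (if s + a = 0 then 1 else 0) + pvInner x (s + a) t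

-- sum of pvInner over all suffixes (B's meaning)
def pvBtails (x : Int) : List Int → Int
  | [] => 0
  | a :: t => pvInner x 0 (a :: t) + pvBtails x t

def pvBsh (x : Int) : List Int → Int
  | [] => 0
  | _ :: t => pvBtails x t

-- integer-valued multiplicity of v in a list
def pvCountI (v : Int) : List Int → Int
  | [] => 0
  | a :: t => (if a = v then 1 else 0) + pvCountI v t

-- A's loop with the hashmap abstracted to the list P of stored prefix sums
def pvLoopA (x : Int) (cnt ps : Int) (P : List Int) : List Int → Int
  | [] => cnt
  | a :: t =>
    if a = x then pvLoopA x cnt 0 [0] t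
    else pvLoopA x (cnt + pvCountI (ps + a) P) (ps + a) ((ps + a) :: P) t

theorem pvCountFrom_spec (x : Int) (l : List Int) : ∀ s c, pvCountFrom x s c l = c + pvInner x s l := by
  induction l with
  | nil => intro s c; simp [pvCountFrom, pvInner]
  | cons a t ih =>
    intro s c
    simp only [pvCountFrom, pvInner]
    split_ifs with h1 h2 <;> simp [ih] <;> ring

theorem pvBLoop_spec (x : Int) (l : List Int) : ∀ total, pvBLoop x total l = total + pvBtails x l := by
  induction l with
  | nil => intro total; simp [pvBLoop, pvBtails]
  | cons a t ih =>
    intro total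
    simp only [pvBLoop, pvBtails]
    rw [ih, pvCountFrom_spec]
    ring

theorem pvBtails_eq (x : Int) (l : List Int) : pvBtails x l = pvInner x 0 l + pvBsh x l := by
  cases l <;> simp [pvBtails, pvBsh, pvInner]

theorem pvCountI_eq_sum (a ps : Int) (P : List Int) :
    pvCountI (ps + a) P = (P.map (fun q => if ps - q + a = 0 then (1 : Int) else 0)).sum := by
  induction P with
  | nil => simp [pvCountI]
  | cons p t ih =>
    simp only [pvCountI, List.map_cons, List.sum_cons, ih]
    congr 1
    by_cases h : p = ps + a
    · rw [if_pos h, if_pos (by omega)]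
    · rw [if_neg h, if_neg (by omega)]

theorem pvSum_map_add (f g : Int → Int) (P : List Int) :
    (P.map (fun q => f q + g q)).sum = (P.map f).sum + (P.map g).sum := by
  induction P with
  | nil => simp
  | cons p t ih => simp [ih]; ring

-- main invariant: the abstracted A-loop counts, per stored prefix sum q, the inner count
-- pvInner x (ps - q) l, plus the counts of subarrays starting strictly later
theorem pvLoopA_spec (x : Int) (l : List Int) : ∀ cnt ps P,
    pvLoopA x cnt ps P l = cnt + (P.map (fun q => pvInner x (ps - q) l)).sum + pvBsh x l := by
  induction l with
  | nil => intro cnt ps P; simp [pvLoopA, pvInner, pvBsh]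
  | cons a t ih =>
    intro cnt ps P
    simp only [pvLoopA]
    by_cases hax : a = x
    · rw [if_pos hax, ih]
      have hz : (P.map (fun q => pvInner x (ps - q) (a :: t))).sum = 0 := by
        have : P.map (fun q => pvInner x (ps - q) (a :: t)) = P.map (fun _ => (0 : Int)) :=
          List.map_congr_left (fun q _ => by simp [pvInner, hax])
        simp [this]
      rw [hz, show pvBsh x (a :: t) = pvBtails x t from rfl, pvBtails_eq x t]
      simp only [List.map_cons, List.map_nil, List.sum_cons, List.sum_nil, sub_self]
      ring
    · rw [if_neg hax, ih]
      simp only [List.map_cons, List.sum_cons]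
      have h1 : (P.map (fun q => pvInner x (ps + a - q) t)).sum
          = (P.map (fun q => pvInner x (ps - q + a) t)).sum := by
        congr 1
        exact List.map_congr_left (fun q _ => by ring_nf)
      have h2 : (P.map (fun q => pvInner x (ps - q) (a :: t))).sum
          = (P.map (fun q => (if ps - q + a = 0 then (1 : Int) else 0) + pvInner x (ps - q + a) t)).sum := by
        congr 1
        exact List.map_congr_left (fun q _ => by simp [pvInner, hax])
      rw [h2, pvSum_map_add, pvCountI_eq_sum, h1]
      have hsub : ps + a - (ps + a) = 0 := by ring
      rw [hsub, show pvBsh x (a :: t) = pvBtails x t from rfl, pvBtails_eq x t]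
      ring

theorem pvInitDict_getD (s : Int) :
    (PySem.Dict.ofList [((0 : Int), (1 : Int))]).getD s 0 = pvCountI s [0] := by
  rw [show (PySem.Dict.ofList [((0 : Int), (1 : Int))]) = PySem.Dict.mk [((0 : Int), (1 : Int))] from rfl,
    PySem.Dict.getD_eq_get?_getD, PySem.Dict.get?_mk_cons]
  simp only [pvCountI]
  by_cases h : (0 : Int) = s <;> simp [h, PySem.Dict.get?]

theorem pvFoldA_spec (x : Int) (l : List Int) : ∀ cnt ps (h : PySem.Dict Int Int) (P : List Int),
    (∀ s, h.getD s 0 = pvCountI s P) →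
    (l.foldl
      (fun (st : Int × Int × PySem.Dict Int Int) num =>
        if num = x then (st.1, 0, PySem.Dict.ofList [((0 : Int), (1 : Int))])
        else
          let ps := st.2.1 + num
          let h := st.2.2
          (st.1 + h.getD ps 0, ps, h.insert ps (h.getD ps 0 + 1)))
      (cnt, ps, h)).1 = pvLoopA x cnt ps P l := by
  induction l with
  | nil => intro cnt ps h P hinv; simp [pvLoopA]
  | cons a t ih =>
    intro cnt ps h P hinv
    simp only [List.foldl_cons, pvLoopA]
    by_cases hax : a = x
    · rw [if_pos hax]
      simp only [if_pos hax]
      exact ih cnt 0 _ [0] pvInitDict_getD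
    · rw [if_neg hax]
      simp only [if_neg hax]
      rw [hinv (ps + a)]
      apply ih
      intro s
      rw [PySem.Dict.getD_insert]
      simp only [pvCountI]
      by_cases hs : s = ps + a
      · subst hs
        rw [if_pos rfl, if_pos rfl]
        ring
      · rw [if_neg hs, if_neg (fun hh => hs hh.symm), hinv]
        ring

-- ===== VERDICT (by name: the statement is the Claim_ definition above) =====
theorem subarr_sum_without_spec : Claim_equal_subarr_sum_without := by
  intro x arr _
  unfold Spec_subarr_sum_without subarr_sum_without subarr_sum_without_alt
  rw [pvFoldA_spec x arr 0 0 _ [0] pvInitDict_getD]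
  rw [pvLoopA_spec, pvBLoop_spec]
  have h00 : (0 : Int) - 0 = 0 := by ring
  simp only [List.map_cons, List.map_nil, List.sum_cons, List.sum_nil, h00]
  rw [pvBtails_eq]
  ring
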